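-- pv_equiv track=rewrite | github.com/sujaypr/SCM | backend/app/services/logistics_service.py | _simple_route_optimization
-- ===== SOURCE A (Python) =====
-- from typing import Dict, List, Any, Optional
--
-- def _simple_route_optimization(destinations: List[str]) -> List[str]:
--     """Simple route optimization algorithm"""
--
--     # For demo purposes, just sort alphabetically with some logic
--     # In reality, this would use sophisticated algorithms like TSP solvers
--
--     priority_cities = ['Mumbai', 'Delhi', 'Chennai', 'Hyderabad']
--
--     prioritized = []
--     others = []
--
--     for dest in destinations:
--         if any(city in dest for city in priority_cities):
--             prioritized.append(dest)
--         else: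
--             others.append(dest)
--
--     # Sort prioritized cities by distance (simplified)
--     prioritized.sort()
--     others.sort()
--
--     return prioritized + others
-- ===== SOURCE B (Python) =====
-- def _simple_route_optimization(destinations):
--     """Simple route optimization algorithm (sort once, then partition)"""
--     priority_cities = ['Mumbai', 'Delhi', 'Chennai', 'Hyderabad']
--
--     def hit(d):
--         return any(city in d for city in priority_cities)
--
--     ordered = sorted(destinations)
--     return [d for d in ordered if hit(d)] + [d for d in ordered if not hit(d)]
-- ===== Notes on version B (the rewrite author's own statement) =====
-- stated objective: alternative
-- what changed: B sorts the whole list once and then partitions the sorted list with two filtering passes, instead of A's partition-first-then-sort-each-group; identical output because the default string order makes each filtered subsequence of the sorted list already sorted.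
import Mathlib
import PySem

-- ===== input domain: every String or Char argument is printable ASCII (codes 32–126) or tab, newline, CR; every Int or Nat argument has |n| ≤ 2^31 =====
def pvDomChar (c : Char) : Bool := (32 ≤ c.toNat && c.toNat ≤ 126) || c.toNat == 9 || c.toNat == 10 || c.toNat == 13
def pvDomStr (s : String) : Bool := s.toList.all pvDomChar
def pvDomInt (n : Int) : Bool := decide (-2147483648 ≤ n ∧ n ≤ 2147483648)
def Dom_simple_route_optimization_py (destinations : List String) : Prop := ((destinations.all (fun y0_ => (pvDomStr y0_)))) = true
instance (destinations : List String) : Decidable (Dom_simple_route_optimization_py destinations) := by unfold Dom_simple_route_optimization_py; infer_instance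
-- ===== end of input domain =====

-- B sorts once, then partitions the sorted list with two filter passes (A partitions first, then sorts each group); same output, alternative decomposition.


-- ===== PORT A =====
def pvPriorityCities : List String := ["Mumbai", "Delhi", "Chennai", "Hyderabad"]

def pvIsPriority (dest : String) : Bool :=
  pvPriorityCities.any (fun city => PySem.Str.isIn city dest)

def simple_route_optimization_py (destinations : List String) : List String :=
  let pair := destinations.foldl
    (fun (acc : List String × List String) dest =>
      if pvIsPriority dest then (acc.1 ++ [dest], acc.2) else (acc.1, acc.2 ++ [dest]))
    ([], [])
  PySem.List.sorted pair.1 (fun x => x) false ++ PySem.List.sorted pair.2 (fun x => x) false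

-- ===== PORT B =====
def simple_route_optimization_py_alt (destinations : List String) : List String :=
  let ordered := PySem.List.sorted destinations (fun x => x) false
  ordered.filter (fun d => pvIsPriority d) ++ ordered.filter (fun d => !(pvIsPriority d))

-- ===== PRECONDITION & SPEC =====
def Spec_simple_route_optimization_py (destinations : List String) (out : List String) : Prop := out = simple_route_optimization_py_alt destinations
instance (destinations : List String) (out : List String) : Decidable (Spec_simple_route_optimization_py destinations out) := by unfold Spec_simple_route_optimization_py; infer_instance

-- ===== CLAIM (what is proved, stated in full; the proofs are below) =====
def Claim_equal_simple_route_optimization_py : Prop := ∀ (destinations : List String), Dom_simple_route_optimization_py destinations → Spec_simple_route_optimization_py destinations (simple_route_optimization_py destinations)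

-- ===== LEMMAS AND PROOFS =====

-- A's pair-accumulating loop computes the two filters.
theorem pv_pairfold (p : String → Bool) :
    ∀ (l a b : List String),
      l.foldl (fun (acc : List String × List String) d =>
        if p d then (acc.1 ++ [d], acc.2) else (acc.1, acc.2 ++ [d])) (a, b)
      = (a ++ l.filter p, b ++ l.filter (fun d => !(p d))) := by
  intro l
  induction l with
  | nil => intro a b; simp
  | cons x xs ih =>
    intro a b
    by_cases h : p x = true <;> simp [List.foldl_cons, h, ih]

-- Stable id-keyed sort commutes with filtering.
theorem pv_sorted_filter (p : String → Bool) (xs : List String) :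
    PySem.List.sorted (xs.filter p) (fun x => x) false
      = (PySem.List.sorted xs (fun x => x) false).filter p := by
  apply PySem.List.sorted_id_eq_of_perm_of_pairwise
  · exact (PySem.List.sorted_perm xs (fun x => x) false).filter p
  · exact (PySem.List.sorted_pairwise xs (fun x => x)).filter p

-- ===== VERDICT (by name: the statement is the Claim_ definition above) =====
theorem simple_route_optimization_py_spec : Claim_equal_simple_route_optimization_py := by
  intro destinations _
  unfold Spec_simple_route_optimization_py simple_route_optimization_py simple_route_optimization_py_alt
  simp only [pv_pairfold pvIsPriority destinations [] [], List.nil_append]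
  rw [pv_sorted_filter, pv_sorted_filter]
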